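-- pv_equiv track=rewrite | github.com/salonxix/Python_100-days-streak | maximize_active_section_with_trade_1.py | max_active_sections
-- ===== SOURCE A (Python) =====
-- def max_active_sections(s: str) -> int:
--     t = '1' + s + '1'
--     n = len(t)
--     initial_ones = t.count('1')
--
--     remove_blocks = []  # (start, end, size)
--     gain_blocks = []    # (start, end, size)
--
--     i = 0
--     while i < n:
--         if t[i] == '1':
--             j = i
--             while j < n and t[j] == '1':
--                 j += 1
--             if i > 0 and j < n and t[i - 1] == '0' and t[j] == '0':
--                 remove_blocks.append((i, j - 1, j - i))
--             i = j
--         elif t[i] == '0':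
--             j = i
--             while j < n and t[j] == '0':
--                 j += 1
--             if i > 0 and j < n and t[i - 1] == '1' and t[j] == '1':
--                 gain_blocks.append((i, j - 1, j - i))
--             i = j
--         else:
--             i += 1
--
--     max_active = initial_ones
--
--     for _, _, r_size in remove_blocks:
--         for _, _, g_size in gain_blocks:
--             max_active = max(max_active, initial_ones - r_size + g_size)
--
--     return max_active
-- ===== SOURCE B (Python) =====
-- def max_active_sections(s: str) -> int:
--     t = '1' + s + '1'
--     ones = t.count('1')
--     best_remove = None   # smallest '1'-run flanked by '0' on both sides
--     best_gain = None     # largest '0'-run flanked by '1' on both sides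
--     prev = None          # character just before the current run (None for the first run)
--     cur = t[0]
--     length = 1
--     for c in t[1:]:
--         if c == cur:
--             length += 1
--         elif cur == '1' and prev == '0' and c == '0':
--             if best_remove is None or length < best_remove:
--                 best_remove = length
--             prev, cur, length = cur, c, 1
--         elif cur == '0' and prev == '1' and c == '1':
--             if best_gain is None or length > best_gain:
--                 best_gain = length
--             prev, cur, length = cur, c, 1
--         else:
--             prev, cur, length = cur, c, 1
--     if best_remove is None or best_gain is None:
--         return ones
--     return max(ones, ones - best_remove + best_gain)
-- ===== Notes on version B (the rewrite author's own statement) =====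
-- stated objective: faster
-- what changed: A materialises lists of remove-blocks and gain-blocks and then maximises over all pairs in a nested loop; B is a single run-length state machine over the string that keeps only the minimal flanked 1-run and maximal flanked 0-run and combines them once.
import Mathlib
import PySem

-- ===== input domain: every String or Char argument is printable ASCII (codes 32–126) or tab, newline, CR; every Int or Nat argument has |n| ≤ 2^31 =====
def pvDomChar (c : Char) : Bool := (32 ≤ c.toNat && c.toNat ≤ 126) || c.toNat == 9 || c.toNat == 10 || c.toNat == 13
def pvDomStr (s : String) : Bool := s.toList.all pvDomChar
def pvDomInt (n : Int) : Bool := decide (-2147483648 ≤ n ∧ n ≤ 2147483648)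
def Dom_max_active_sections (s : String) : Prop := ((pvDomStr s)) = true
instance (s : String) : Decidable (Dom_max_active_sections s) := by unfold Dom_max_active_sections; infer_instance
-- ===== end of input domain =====

-- B replaces A's materialised block lists + nested max loop by a single run-length
-- state machine tracking only min remove-run / max gain-run (objective: faster, O(n)).

-- ===== PORT A =====

-- inner `while j < n and t[j] == c: j += 1`
def pvRunEnd (t : List Char) (c : Char) (j : Nat) : Nat :=
  if h : j < t.length ∧ t.getD j ' ' = c then pvRunEnd t c (j + 1) else j
termination_by t.length - j
decreasing_by omega

theorem pvRunEnd_ge (t : List Char) (c : Char) (j : Nat) : j ≤ pvRunEnd t c j := by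
  unfold pvRunEnd
  split
  · exact le_trans (Nat.le_succ j) (pvRunEnd_ge t c (j + 1))
  · exact le_refl j
termination_by t.length - j
decreasing_by rename_i h; omega

theorem pvRunEnd_gt (t : List Char) (c : Char) (j : Nat)
    (h1 : j < t.length) (h2 : t.getD j ' ' = c) : j < pvRunEnd t c j := by
  rw [pvRunEnd]
  rw [dif_pos ⟨h1, h2⟩]
  exact lt_of_lt_of_le (Nat.lt_succ_self j) (pvRunEnd_ge t c (j + 1))

-- A's outer `while i < n` loop, collecting (start, end, size) blocks
def pvLoopA (t : List Char) (i : Nat) (rem gain : List (Nat × Nat × Nat)) :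
    List (Nat × Nat × Nat) × List (Nat × Nat × Nat) :=
  if h : i < t.length then
    let c := t.getD i ' '
    if hc1 : c = '1' then
      let j := pvRunEnd t '1' i
      let rem' := if 0 < i ∧ j < t.length ∧ t.getD (i - 1) ' ' = '0' ∧ t.getD j ' ' = '0'
                  then rem ++ [(i, j - 1, j - i)] else rem
      pvLoopA t j rem' gain
    else if hc0 : c = '0' then
      let j := pvRunEnd t '0' i
      let gain' := if 0 < i ∧ j < t.length ∧ t.getD (i - 1) ' ' = '1' ∧ t.getD j ' ' = '1'
                   then gain ++ [(i, j - 1, j - i)] else gain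
      pvLoopA t j rem gain'
    else pvLoopA t (i + 1) rem gain
  else (rem, gain)
termination_by t.length - i
decreasing_by
  · have := pvRunEnd_gt t '1' i h hc1; omega
  · have := pvRunEnd_gt t '0' i h hc0; omega
  · omega

def max_active_sections (s : String) : Int :=
  let t := '1' :: s.toList ++ ['1']
  let ones : Int := (t.count '1' : Int)
  let p := pvLoopA t 0 [] []
  p.1.foldl (fun m rb => p.2.foldl (fun m' gb => max m' (ones - (rb.2.2 : Int) + (gb.2.2 : Int))) m) ones

-- ===== PORT B =====

-- one step of B's for-loop; state = (prev, cur, length, best_remove, best_gain)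
def pvStepB (st : Option Char × Char × Nat × Option Nat × Option Nat) (c : Char) :
    Option Char × Char × Nat × Option Nat × Option Nat :=
  let (prev, cur, len, br, bg) := st
  if c = cur then (prev, cur, len + 1, br, bg)
  else if cur = '1' ∧ prev = some '0' ∧ c = '0' then
    (some cur, c, 1, if br.isNone ∨ len < br.getD 0 then some len else br, bg)
  else if cur = '0' ∧ prev = some '1' ∧ c = '1' then
    (some cur, c, 1, br, if bg.isNone ∨ bg.getD 0 < len then some len else bg)
  else (some cur, c, 1, br, bg)

def max_active_sections_alt (s : String) : Int :=
  let t := '1' :: s.toList ++ ['1']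
  let ones : Int := (t.count '1' : Int)
  let st := (t.drop 1).foldl pvStepB (none, t.headD ' ', 1, none, none)
  match st.2.2.2.1, st.2.2.2.2 with
  | some br, some bg => max ones (ones - (br : Int) + (bg : Int))
  | some _, none => ones
  | none, _ => ones

-- ===== PRECONDITION & SPEC =====
def Spec_max_active_sections (s : String) (out : Int) : Prop := out = max_active_sections_alt s
instance (s : String) (out : Int) : Decidable (Spec_max_active_sections s out) := by unfold Spec_max_active_sections; infer_instance

-- ===== CLAIM (what is proved, stated in full; the proofs are below) =====
def Claim_equal_max_active_sections : Prop := ∀ (s : String), Dom_max_active_sections s → Spec_max_active_sections s (max_active_sections s)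

-- ===== LEMMAS AND PROOFS =====

-- Spec-side view: run decomposition of u (with prev = char just before u),
-- returning the sizes of qualifying remove-runs and gain-runs, in order.
def pvRuns (prev : Option Char) : List Char → List Nat × List Nat
  | [] => ([], [])
  | c :: u =>
    let k := (u.takeWhile (· = c)).length + 1
    let u' := u.dropWhile (· = c)
    let p := pvRuns (some c) u'
    (if c = '1' ∧ prev = some '0' ∧ u'.head? = some '0' then k :: p.1 else p.1,
     if c = '0' ∧ prev = some '1' ∧ u'.head? = some '1' then k :: p.2 else p.2)
termination_by u => u.length
decreasing_by simp; exact List.length_dropWhile_le _ _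

def pvUpdMin (b : Option Nat) (k : Nat) : Option Nat :=
  if b.isNone ∨ k < b.getD 0 then some k else b
def pvUpdMax (b : Option Nat) (k : Nat) : Option Nat :=
  if b.isNone ∨ b.getD 0 < k then some k else b
def pvPrevAt (t : List Char) (i : Nat) : Option Char :=
  if i = 0 then none else some (t.getD (i - 1) ' ')

theorem pvRuns_skip (c : Char) (u : List Char) :
    pvRuns (some c) u = pvRuns (some c) (u.dropWhile (· = c)) := by
  cases u with
  | nil => simp [List.dropWhile]
  | cons x u =>
    by_cases hx : x = c
    · subst hx
      conv_lhs => rw [pvRuns.eq_def]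
      dsimp only
      have h1 : ¬(x = '1' ∧ (some x : Option Char) = some '0' ∧ (u.dropWhile (· = x)).head? = some '0') := by
        rintro ⟨h, h', _⟩; simp at h'; rw [h] at h'; exact absurd h'.symm (by decide)
      have h2 : ¬(x = '0' ∧ (some x : Option Char) = some '1' ∧ (u.dropWhile (· = x)).head? = some '1') := by
        rintro ⟨h, h', _⟩; simp at h'; rw [h] at h'; exact absurd h'.symm (by decide)
      simp only [if_neg h1, if_neg h2]
      rw [List.dropWhile_cons_of_pos (by simp)]
    · rw [List.dropWhile_cons_of_neg (by simp [hx])]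

theorem pvRunEnd_eq (t : List Char) (c : Char) (i : Nat) :
    pvRunEnd t c i = i + ((t.drop i).takeWhile (· = c)).length := by
  rw [pvRunEnd]
  by_cases h : i < t.length ∧ t.getD i ' ' = c
  · rw [dif_pos h]
    obtain ⟨h1, h2⟩ := h
    have hdrop : t.drop i = t[i] :: t.drop (i + 1) := List.drop_eq_getElem_cons h1
    have hgi : t[i] = c := by rwa [List.getD_eq_getElem?_getD, List.getElem?_eq_getElem h1, Option.getD_some] at h2
    rw [hdrop, List.takeWhile_cons_of_pos (by simp [hgi])]
    rw [pvRunEnd_eq t c (i + 1)]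
    simp; omega
  · rw [dif_neg h]
    rcases Nat.lt_or_ge i t.length with hlt | hge
    · have h2 : t.getD i ' ' ≠ c := fun hc => h ⟨hlt, hc⟩
      have hdrop : t.drop i = t[i] :: t.drop (i + 1) := List.drop_eq_getElem_cons hlt
      have hgi : t[i] ≠ c := by rwa [List.getD_eq_getElem?_getD, List.getElem?_eq_getElem hlt, Option.getD_some] at h2
      rw [hdrop, List.takeWhile_cons_of_neg (by simp [hgi])]
      simp
    · rw [List.drop_eq_nil_of_le hge]; simp
termination_by t.length - i
decreasing_by omega

theorem pvDropWhile_eq_drop (l : List Char) (p : Char → Bool) :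
    l.dropWhile p = l.drop (l.takeWhile p).length := by
  calc l.dropWhile p = (l.takeWhile p ++ l.dropWhile p).drop (l.takeWhile p).length :=
        List.drop_left.symm
    _ = l.drop (l.takeWhile p).length := by rw [List.takeWhile_append_dropWhile]

-- shared facts about the maximal run of `ch` starting at position i
theorem pvRunFacts (t : List Char) (i : Nat) (ch : Char) (h : i < t.length)
    (hch : t.getD i ' ' = ch) :
    1 ≤ ((t.drop i).takeWhile (· = ch)).length ∧
    i + ((t.drop i).takeWhile (· = ch)).length ≤ t.length ∧
    t.drop (i + ((t.drop i).takeWhile (· = ch)).length) = (t.drop i).dropWhile (· = ch) ∧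
    pvPrevAt t (i + ((t.drop i).takeWhile (· = ch)).length) = some ch := by
  set k := ((t.drop i).takeWhile (· = ch)).length with hk
  have hdrop : t.drop i = t[i] :: t.drop (i + 1) := List.drop_eq_getElem_cons h
  have hgi : t[i] = ch := by
    rwa [List.getD_eq_getElem?_getD, List.getElem?_eq_getElem h, Option.getD_some] at hch
  have hk1 : 1 ≤ k := by
    rw [hk, hdrop, List.takeWhile_cons_of_pos (by simp [hgi])]
    simp
  have hkle : k ≤ (t.drop i).length := (List.takeWhile_prefix _).length_le
  have hlen : (t.drop i).length = t.length - i := List.length_drop ..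
  have hik : i + k ≤ t.length := by omega
  have hdropj : t.drop (i + k) = (t.drop i).dropWhile (· = ch) := by
    rw [pvDropWhile_eq_drop, ← hk, List.drop_drop, Nat.add_comm]
  refine ⟨hk1, hik, hdropj, ?_⟩
  have hj1 : i + k - 1 < t.length := by omega
  have hkk : k - 1 < ((t.drop i).takeWhile (· = ch)).length := by omega
  have hpre := List.takeWhile_prefix (l := t.drop i) (· = ch)
  have hgel : ((t.drop i).takeWhile (· = ch))[k-1]'hkk = (t.drop i)[k-1]'(by omega) :=
    hpre.getElem hkk
  have hmem : (((t.drop i).takeWhile (· = ch))[k-1]'hkk = ch) := by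
    have := List.mem_takeWhile_imp (List.getElem_mem hkk)
    simpa using this
  have hdg : (t.drop i)[k-1]'(by omega) = t[i + (k-1)]'(by omega) := List.getElem_drop ..
  rw [hgel] at hmem
  rw [hdg] at hmem
  unfold pvPrevAt
  rw [if_neg (by omega), List.getD_eq_getElem?_getD]
  have heq : i + k - 1 = i + (k - 1) := by omega
  rw [heq, List.getElem?_eq_getElem (by omega), Option.getD_some]
  rw [hmem]

-- A's loop, started at any position i, appends exactly the qualifying run sizes of the suffix.
theorem pvLoopA_spec (t : List Char) (i : Nat) (rem gain : List (Nat × Nat × Nat)) :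
    ((pvLoopA t i rem gain).1.map (·.2.2), (pvLoopA t i rem gain).2.map (·.2.2)) =
      (rem.map (·.2.2) ++ (pvRuns (pvPrevAt t i) (t.drop i)).1,
       gain.map (·.2.2) ++ (pvRuns (pvPrevAt t i) (t.drop i)).2) := by
  rw [pvLoopA]
  by_cases h : i < t.length
  · rw [dif_pos h]
    have hdrop : t.drop i = t[i] :: t.drop (i + 1) := List.drop_eq_getElem_cons h
    by_cases hc1 : t.getD i ' ' = '1'
    · rw [dif_pos hc1]
      obtain ⟨hk1, hik, hdropj, hprevj⟩ := pvRunFacts t i '1' h hc1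
      set k := ((t.drop i).takeWhile (· = '1')).length with hk
      have hgi : t[i] = '1' := by
        rwa [List.getD_eq_getElem?_getD, List.getElem?_eq_getElem h, Option.getD_some] at hc1
      have hj : pvRunEnd t '1' i = i + k := pvRunEnd_eq t '1' i
      have hhead : (t.drop (i + k)).head? = t[i + k]? := List.head?_drop ..
      have hdw : (t.drop i).dropWhile (· = '1') = (t.drop (i + 1)).dropWhile (· = '1') := by
        rw [hdrop, List.dropWhile_cons_of_pos (by simp [hgi])]
      have hguard : (0 < i ∧ i + k < t.length ∧ t.getD (i - 1) ' ' = '0' ∧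
            t.getD (i + k) ' ' = '0')
          ↔ (pvPrevAt t i = some '0' ∧ ((t.drop (i + 1)).dropWhile (· = '1')).head? = some '0') := by
        rw [← hdw, ← hdropj, hhead]
        unfold pvPrevAt
        constructor
        · rintro ⟨h0, hlt, hm1, hjj⟩
          rw [if_neg (by omega)]
          refine ⟨by rw [hm1], ?_⟩
          rw [List.getD_eq_getElem?_getD, List.getElem?_eq_getElem hlt, Option.getD_some] at hjj
          rw [List.getElem?_eq_getElem hlt, hjj]
        · rintro ⟨hm1, hjj⟩
          rw [List.getElem?_eq_some_iff] at hjj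
          obtain ⟨hlt, hv⟩ := hjj
          by_cases h0 : i = 0
          · rw [if_pos h0] at hm1; exact absurd hm1 (by simp)
          · rw [if_neg h0] at hm1
            refine ⟨by omega, hlt, by simpa using hm1, ?_⟩
            rw [List.getD_eq_getElem?_getD, List.getElem?_eq_getElem hlt, Option.getD_some, hv]
      have hkeq : ((t.drop (i + 1)).takeWhile (· = '1')).length + 1 = k := by
        rw [hk, hdrop, List.takeWhile_cons_of_pos (by simp [hgi])]; simp
      clear_value k
      dsimp only
      rw [hj]
      have IH := pvLoopA_spec t (i + k)
        (if 0 < i ∧ i + k < t.length ∧ t.getD (i - 1) ' ' = '0' ∧ t.getD (i + k) ' ' = '0'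
         then rem ++ [(i, i + k - 1, i + k - i)] else rem) gain
      rw [hprevj, hdropj, hdw] at IH
      simp only [Prod.mk.injEq] at IH ⊢
      obtain ⟨IH1, IH2⟩ := IH
      rw [hdrop, hgi, pvRuns.eq_def]
      dsimp only
      have hf : ¬(('1' : Char) = '0' ∧ pvPrevAt t i = some '1' ∧
          ((t.drop (i + 1)).dropWhile (· = '1')).head? = some '1') := by
        rintro ⟨hx, -, -⟩; exact absurd hx (by decide)
      rw [if_neg hf]
      by_cases G : pvPrevAt t i = some '0' ∧ ((t.drop (i + 1)).dropWhile (· = '1')).head? = some '0'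
      · have hcond : ('1' : Char) = '1' ∧ pvPrevAt t i = some '0' ∧
            ((t.drop (i + 1)).dropWhile (· = '1')).head? = some '0' := ⟨rfl, G⟩
        rw [if_pos (hguard.mpr G)] at IH1 IH2 ⊢
        rw [if_pos hcond]
        refine ⟨?_, IH2⟩
        rw [IH1, List.map_append, List.append_assoc]
        congr 1
        simp
        omega
      · have hcond : ¬(('1' : Char) = '1' ∧ pvPrevAt t i = some '0' ∧
            ((t.drop (i + 1)).dropWhile (· = '1')).head? = some '0') := fun hR => G hR.2
        rw [if_neg (fun hA => G (hguard.mp hA))] at IH1 IH2 ⊢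
        rw [if_neg hcond]
        exact ⟨IH1, IH2⟩
    · rw [dif_neg hc1]
      by_cases hc0 : t.getD i ' ' = '0'
      · rw [dif_pos hc0]
        obtain ⟨hk1, hik, hdropj, hprevj⟩ := pvRunFacts t i '0' h hc0
        set k := ((t.drop i).takeWhile (· = '0')).length with hk
        have hgi : t[i] = '0' := by
          rwa [List.getD_eq_getElem?_getD, List.getElem?_eq_getElem h, Option.getD_some] at hc0
        have hj : pvRunEnd t '0' i = i + k := pvRunEnd_eq t '0' i
        have hhead : (t.drop (i + k)).head? = t[i + k]? := List.head?_drop ..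
        have hdw : (t.drop i).dropWhile (· = '0') = (t.drop (i + 1)).dropWhile (· = '0') := by
          rw [hdrop, List.dropWhile_cons_of_pos (by simp [hgi])]
        have hguard : (0 < i ∧ i + k < t.length ∧ t.getD (i - 1) ' ' = '1' ∧
              t.getD (i + k) ' ' = '1')
            ↔ (pvPrevAt t i = some '1' ∧ ((t.drop (i + 1)).dropWhile (· = '0')).head? = some '1') := by
          rw [← hdw, ← hdropj, hhead]
          unfold pvPrevAt
          constructor
          · rintro ⟨h0, hlt, hm1, hjj⟩
            rw [if_neg (by omega)]
            refine ⟨by rw [hm1], ?_⟩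
            rw [List.getD_eq_getElem?_getD, List.getElem?_eq_getElem hlt, Option.getD_some] at hjj
            rw [List.getElem?_eq_getElem hlt, hjj]
          · rintro ⟨hm1, hjj⟩
            rw [List.getElem?_eq_some_iff] at hjj
            obtain ⟨hlt, hv⟩ := hjj
            by_cases h0 : i = 0
            · rw [if_pos h0] at hm1; exact absurd hm1 (by simp)
            · rw [if_neg h0] at hm1
              refine ⟨by omega, hlt, by simpa using hm1, ?_⟩
              rw [List.getD_eq_getElem?_getD, List.getElem?_eq_getElem hlt, Option.getD_some, hv]
        have hkeq : ((t.drop (i + 1)).takeWhile (· = '0')).length + 1 = k := by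
          rw [hk, hdrop, List.takeWhile_cons_of_pos (by simp [hgi])]; simp
        clear_value k
        dsimp only
        rw [hj]
        have IH := pvLoopA_spec t (i + k) rem
          (if 0 < i ∧ i + k < t.length ∧ t.getD (i - 1) ' ' = '1' ∧ t.getD (i + k) ' ' = '1'
           then gain ++ [(i, i + k - 1, i + k - i)] else gain)
        rw [hprevj, hdropj, hdw] at IH
        simp only [Prod.mk.injEq] at IH ⊢
        obtain ⟨IH1, IH2⟩ := IH
        rw [hdrop, hgi, pvRuns.eq_def]
        dsimp only
        have hf : ¬(('0' : Char) = '1' ∧ pvPrevAt t i = some '0' ∧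
            ((t.drop (i + 1)).dropWhile (· = '0')).head? = some '0') := by
          rintro ⟨hx, -, -⟩; exact absurd hx (by decide)
        rw [if_neg hf]
        by_cases G : pvPrevAt t i = some '1' ∧ ((t.drop (i + 1)).dropWhile (· = '0')).head? = some '1'
        · have hcond : ('0' : Char) = '0' ∧ pvPrevAt t i = some '1' ∧
              ((t.drop (i + 1)).dropWhile (· = '0')).head? = some '1' := ⟨rfl, G⟩
          rw [if_pos (hguard.mpr G)] at IH1 IH2 ⊢
          rw [if_pos hcond]
          refine ⟨IH1, ?_⟩
          rw [IH2, List.map_append, List.append_assoc]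
          congr 1
          simp
          omega
        · have hcond : ¬(('0' : Char) = '0' ∧ pvPrevAt t i = some '1' ∧
              ((t.drop (i + 1)).dropWhile (· = '0')).head? = some '1') := fun hR => G hR.2
          rw [if_neg (fun hA => G (hguard.mp hA))] at IH1 IH2 ⊢
          rw [if_neg hcond]
          exact ⟨IH1, IH2⟩
      · rw [dif_neg hc0]
        have hgi1 : t[i] ≠ '1' := by
          rw [List.getD_eq_getElem?_getD, List.getElem?_eq_getElem h, Option.getD_some] at hc1
          exact hc1
        have hgi0 : t[i] ≠ '0' := by
          rw [List.getD_eq_getElem?_getD, List.getElem?_eq_getElem h, Option.getD_some] at hc0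
          exact hc0
        have IH := pvLoopA_spec t (i + 1) rem gain
        have hprev : pvPrevAt t (i + 1) = some t[i] := by
          unfold pvPrevAt
          rw [if_neg (by omega)]
          simp
          rw [List.getElem?_eq_getElem h]
          rfl
        rw [hprev] at IH
        rw [IH]
        have hruns : pvRuns (pvPrevAt t i) (t.drop i) = pvRuns (some t[i]) (t.drop (i + 1)) := by
          rw [hdrop, pvRuns.eq_def]
          dsimp only
          rw [if_neg (fun hx => hgi1 hx.1), if_neg (fun hx => hgi0 hx.1)]
          rw [pvRuns_skip t[i] (t.drop (i + 1))]
        rw [hruns]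
  · rw [dif_neg h]
    rw [List.drop_eq_nil_of_le (by omega)]
    simp [pvRuns]
termination_by t.length - i
decreasing_by
  · omega
  · omega
  · omega

theorem pvFoldMin_some (l : List Nat) : ∀ x, l.foldl pvUpdMin (some x) = some (l.foldl min x) := by
  induction l with
  | nil => intro x; rfl
  | cons k l ih =>
    intro x
    have : pvUpdMin (some x) k = some (min x k) := by
      unfold pvUpdMin; split_ifs with h <;> simp at h ⊢ <;> omega
    simp only [List.foldl_cons, this, ih]

theorem pvFoldMax_some (l : List Nat) : ∀ x, l.foldl pvUpdMax (some x) = some (l.foldl max x) := by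
  induction l with
  | nil => intro x; rfl
  | cons k l ih =>
    intro x
    have : pvUpdMax (some x) k = some (max x k) := by
      unfold pvUpdMax; split_ifs with h <;> simp at h ⊢ <;> omega
    simp only [List.foldl_cons, this, ih]

theorem pvFoldlMaxInit (l : List Nat) : ∀ a b, l.foldl max (max a b) = max a (l.foldl max b) := by
  induction l with
  | nil => intro a b; rfl
  | cons x l ih =>
    intro a b
    simp only [List.foldl_cons]
    rw [max_assoc, ih]

theorem pvFoldlMinInit (l : List Nat) : ∀ a b, l.foldl min (min a b) = min a (l.foldl min b) := by
  induction l with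
  | nil => intro a b; rfl
  | cons x l ih =>
    intro a b
    simp only [List.foldl_cons]
    rw [min_assoc, ih]

theorem pvInnerFold (k : Int) (gs : List Nat) : ∀ (g : Nat) (m : Int),
    (g :: gs).foldl (fun (m' : Int) (g' : Nat) => max m' (k + (g' : Int))) m
      = max m (k + ((gs.foldl max g : Nat) : Int)) := by
  induction gs with
  | nil => intro g m; simp
  | cons g2 gs ih =>
    intro g m
    simp only [List.foldl_cons] at ih ⊢
    rw [ih g2 (max m (k + (g : Int)))]
    have h1 : gs.foldl max (max g g2) = max g (gs.foldl max g2) := pvFoldlMaxInit gs g g2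
    rw [h1]
    push_cast
    omega

theorem pvOuterFold (ones G : Int) (rs : List Nat) : ∀ (r : Nat) (m : Int),
    (r :: rs).foldl (fun (m' : Int) (r' : Nat) => max m' (ones - (r' : Int) + G)) m
      = max m (ones - ((rs.foldl min r : Nat) : Int) + G) := by
  induction rs with
  | nil => intro r m; simp
  | cons r2 rs ih =>
    intro r m
    simp only [List.foldl_cons] at ih ⊢
    rw [ih r2 (max m (ones - (r : Int) + G))]
    have h1 : rs.foldl min (min r r2) = min r (rs.foldl min r2) := pvFoldlMinInit rs r r2
    rw [h1]
    push_cast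
    omega

theorem pvTakeRep (m : Nat) (c x : Char) (u : List Char) (h : x ≠ c) :
    List.takeWhile (· = c) (List.replicate m c ++ x :: u) = List.replicate m c := by
  induction m with
  | zero => simp [List.takeWhile_cons_of_neg, h]
  | succ n ih => simp [List.replicate_succ, List.takeWhile_cons_of_pos, ih]

theorem pvDropRep (m : Nat) (c x : Char) (u : List Char) (h : x ≠ c) :
    List.dropWhile (· = c) (List.replicate m c ++ x :: u) = x :: u := by
  induction m with
  | zero => simp [List.dropWhile_cons_of_neg, h]
  | succ n ih => simp [List.replicate_succ, List.dropWhile_cons_of_pos, ih]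

theorem pvRuns_replicate (prev : Option Char) (cur : Char) (len : Nat) :
    pvRuns prev (List.replicate len cur) = ([], []) := by
  cases len with
  | zero => simp [pvRuns]
  | succ m =>
    rw [List.replicate_succ, pvRuns.eq_def]
    dsimp only
    have hd : List.dropWhile (fun x => decide (x = cur)) (List.replicate m cur) = [] := by simp
    rw [hd]
    simp [pvRuns]

-- pvRuns on a list beginning with a maximal cur-run of length len followed by c ≠ cur
theorem pvRuns_cons_run (prev : Option Char) (cur c : Char) (len : Nat) (u : List Char)
    (hlen : 1 ≤ len) (hc : c ≠ cur) :
    pvRuns prev (List.replicate len cur ++ c :: u) =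
      (let p := pvRuns (some cur) (c :: u)
       (if cur = '1' ∧ prev = some '0' ∧ c = '0' then len :: p.1 else p.1,
        if cur = '0' ∧ prev = some '1' ∧ c = '1' then len :: p.2 else p.2)) := by
  obtain ⟨m, rfl⟩ : ∃ m, len = m + 1 := ⟨len - 1, by omega⟩
  rw [List.replicate_succ, List.cons_append, pvRuns.eq_def]
  dsimp only
  have ht : List.takeWhile (fun x => decide (x = cur)) (List.replicate m cur ++ c :: u)
      = List.replicate m cur := pvTakeRep m cur c u hc
  have hd : List.dropWhile (fun x => decide (x = cur)) (List.replicate m cur ++ c :: u)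
      = c :: u := pvDropRep m cur c u hc
  rw [ht, hd]
  simp

-- B's fold, from a mid-run state, folds pvUpdMin/pvUpdMax over the qualifying run sizes.
theorem pvFoldB_spec (u : List Char) : ∀ (prev : Option Char) (cur : Char) (len : Nat)
    (br bg : Option Nat), 1 ≤ len →
    (u.foldl pvStepB (prev, cur, len, br, bg)).2.2.2 =
      ((pvRuns prev (List.replicate len cur ++ u)).1.foldl pvUpdMin br,
       (pvRuns prev (List.replicate len cur ++ u)).2.foldl pvUpdMax bg) := by
  induction u with
  | nil =>
    intro prev cur len br bg hlen
    simp only [List.foldl_nil, List.append_nil, pvRuns_replicate]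
  | cons c u ih =>
    intro prev cur len br bg hlen
    by_cases hc : c = cur
    · subst hc
      have hstep : pvStepB (prev, c, len, br, bg) c = (prev, c, len + 1, br, bg) := by
        simp [pvStepB]
      rw [List.foldl_cons, hstep, ih prev c (len + 1) br bg (by omega)]
      have hrep : List.replicate (len + 1) c ++ u = List.replicate len c ++ c :: u := by
        rw [List.replicate_succ']; simp
      rw [hrep]
    · rw [List.foldl_cons, pvRuns_cons_run prev cur c len u hlen hc]
      by_cases h1 : cur = '1' ∧ prev = some '0' ∧ c = '0'
      · have h2 : ¬(cur = '0' ∧ prev = some '1' ∧ c = '1') := by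
          rintro ⟨hh, -, -⟩; rw [h1.1] at hh; exact absurd hh (by decide)
        have hstep : pvStepB (prev, cur, len, br, bg) c =
            (some cur, c, 1, pvUpdMin br len, bg) := by
          simp only [pvStepB, pvUpdMin]
          rw [if_neg hc, if_pos h1]
        rw [hstep, ih (some cur) c 1 (pvUpdMin br len) bg le_rfl]
        simp only [List.replicate_one, List.singleton_append]
        rw [if_pos h1, if_neg h2]
        simp only [List.foldl_cons]
      · by_cases h2 : cur = '0' ∧ prev = some '1' ∧ c = '1'
        · have hstep : pvStepB (prev, cur, len, br, bg) c =
              (some cur, c, 1, br, pvUpdMax bg len) := by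
            simp only [pvStepB, pvUpdMax]
            rw [if_neg hc, if_neg h1, if_pos h2]
          rw [hstep, ih (some cur) c 1 br (pvUpdMax bg len) le_rfl]
          simp only [List.replicate_one, List.singleton_append]
          rw [if_neg h1, if_pos h2]
          simp only [List.foldl_cons]
        · have hstep : pvStepB (prev, cur, len, br, bg) c = (some cur, c, 1, br, bg) := by
            simp only [pvStepB]
            rw [if_neg hc, if_neg h1, if_neg h2]
          rw [hstep, ih (some cur) c 1 br bg le_rfl]
          simp only [List.replicate_one, List.singleton_append]
          rw [if_neg h1, if_neg h2]

-- arithmetic: the nested max-fold equals the min/max combination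
theorem pvCombine (ones : Int) (rs gs : List Nat) :
    rs.foldl (fun (m : Int) (r : Nat) => gs.foldl (fun (m' : Int) (g : Nat) => max m' (ones - (r : Int) + (g : Int))) m) ones =
      (match rs.foldl pvUpdMin none, gs.foldl pvUpdMax none with
       | some br, some bg => max ones (ones - (br : Int) + (bg : Int))
       | some _, none => ones
       | none, _ => ones) := by
  cases rs with
  | nil => rfl
  | cons r rs =>
    cases gs with
    | nil =>
      have hfix : ∀ (l : List Nat) (m : Int), l.foldl (fun m' (_ : Nat) => m') m = m := by
        intro l; induction l with
        | nil => intro m; rfl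
        | cons x l ih => intro m; simp only [List.foldl_cons]; exact ih m
      simp only [List.foldl_nil]
      rw [hfix]
      cases (r :: rs).foldl pvUpdMin none <;> rfl
    | cons g gs =>
      have hbr : (r :: rs).foldl pvUpdMin none = some (rs.foldl min r) := by
        simp only [List.foldl_cons]
        rw [show pvUpdMin none r = some r from rfl, pvFoldMin_some]
      have hbg : (g :: gs).foldl pvUpdMax none = some (gs.foldl max g) := by
        simp only [List.foldl_cons]
        rw [show pvUpdMax none g = some g from rfl, pvFoldMax_some]
      rw [hbr, hbg]
      have hinner : ∀ (m : Int) (rr : Nat),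
          (g :: gs).foldl (fun (m' : Int) (g' : Nat) => max m' (ones - (rr : Int) + (g' : Int))) m
            = max m (ones - (rr : Int) + ((gs.foldl max g : Nat) : Int)) :=
        fun m rr => pvInnerFold (ones - (rr : Int)) gs g m
      have hcongr : (r :: rs).foldl
            (fun (m : Int) (rr : Nat) => (g :: gs).foldl (fun (m' : Int) (g' : Nat) => max m' (ones - (rr : Int) + (g' : Int))) m) ones
          = (r :: rs).foldl (fun (m : Int) (rr : Nat) => max m (ones - (rr : Int) + ((gs.foldl max g : Nat) : Int))) ones := by
        apply PySem.List.foldl_congr_mem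
        intro m rr _; exact hinner m rr
      rw [hcongr, pvOuterFold]

-- ===== VERDICT (by name: the statement is the Claim_ definition above) =====
theorem max_active_sections_spec : Claim_equal_max_active_sections := by
  intro s _
  unfold Spec_max_active_sections max_active_sections max_active_sections_alt
  dsimp only
  set t := '1' :: s.toList ++ ['1'] with ht
  set ones : Int := (t.count '1' : Int) with hones
  -- A side: the block lists carry exactly the qualifying run sizes
  have hA := pvLoopA_spec t 0 [] []
  simp only [Prod.mk.injEq, List.map_nil, List.nil_append, List.drop_zero] at hA
  obtain ⟨hA1, hA2⟩ := hA
  have hprev0 : pvPrevAt t 0 = none := rfl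
  rw [hprev0] at hA1 hA2
  -- B side: the fold computes the min/max folds over the same run sizes
  have hB := pvFoldB_spec (t.drop 1) none (t.headD ' ') 1 none none le_rfl
  have trep : List.replicate 1 (t.headD ' ') ++ t.drop 1 = t := by rw [ht]; rfl
  rw [trep] at hB
  have hB1 := congrArg Prod.fst hB
  have hB2 := congrArg Prod.snd hB
  dsimp only at hB1 hB2
  rw [hB1, hB2]
  -- rewrite A's nested fold over triples as a fold over the mapped size lists
  have e1 : (pvLoopA t 0 [] []).1.foldl
        (fun m rb => (pvLoopA t 0 [] []).2.foldl
          (fun m' gb => max m' (ones - (rb.2.2 : Int) + (gb.2.2 : Int))) m) ones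
      = ((pvLoopA t 0 [] []).1.map (·.2.2)).foldl
          (fun (m : Int) (r : Nat) => (((pvLoopA t 0 [] []).2.map (·.2.2)).foldl
            (fun (m' : Int) (g : Nat) => max m' (ones - (r : Int) + (g : Int))) m)) ones := by
    rw [List.foldl_map]
    congr 1
    funext m rb
    rw [List.foldl_map]
  rw [e1, hA1, hA2]
  exact pvCombine ones ((pvRuns none t).1) ((pvRuns none t).2)
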